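-- pv_equiv track=rewrite | github.com/cayhorstmann/codecheck2 | samples/python/call/double.py | doubleImage
-- ===== SOURCE A (Python) =====
-- def doubleImage(img):
--     ##SHOW
--     result = ""
--     row = ""
--     lastIndex = 0;
--     for i in range(0, len(img)):
--         ch = img[i]
--         if (ch == '\n'):
--             ##HIDE
--             row += "\n"
--             result += "\n"
--             result += row
--             row = ""
--             ##SHOW // your work here
--         else:
--             ##HIDE
--             row += img[i]
--             row += img[i]
--             result += img[i]
--             result += img[i]
--             ##SHOW // your work here
--     return result
-- ===== SOURCE B (Python) =====
-- def doubleImage(img):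
--     parts = img.split('\n')
--     pieces = []
--     for i, line in enumerate(parts):
--         d = ''.join(ch * 2 for ch in line)
--         if i < len(parts) - 1:
--             pieces.append(d + '\n' + d + '\n')
--         else:
--             pieces.append(d)
--     return ''.join(pieces)
-- ===== Notes on version B (the rewrite author's own statement) =====
-- stated objective: simpler
-- what changed: B splits the image into lines once and maps each line to its doubled form (duplicated with newlines for all but the last split piece), instead of A iterating character by character while maintaining two growing string accumulators.
import Mathlib
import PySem

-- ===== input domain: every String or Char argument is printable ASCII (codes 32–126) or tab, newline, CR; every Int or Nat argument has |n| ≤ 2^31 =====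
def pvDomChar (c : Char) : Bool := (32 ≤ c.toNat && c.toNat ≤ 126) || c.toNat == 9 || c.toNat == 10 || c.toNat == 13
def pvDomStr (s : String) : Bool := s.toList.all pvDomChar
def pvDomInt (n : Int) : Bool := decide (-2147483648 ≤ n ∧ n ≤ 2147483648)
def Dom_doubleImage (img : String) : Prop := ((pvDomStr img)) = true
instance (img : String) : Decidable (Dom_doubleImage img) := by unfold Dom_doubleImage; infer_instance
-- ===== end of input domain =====

-- B replaces A's char-by-char loop (parallel 'row'/'result' accumulators) by split-on-'\n',
-- double each line, and duplicate every newline-terminated line; objective: simpler.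

-- ===== PORT A =====
-- one loop step: (result, row) updated per character, branches in A's order
def pvStepA (st : List Char × List Char) (ch : Char) : List Char × List Char :=
  if ch = '\n' then
    -- row += "\n"; result += "\n"; result += row; row = ""
    (st.1 ++ '\n' :: (st.2 ++ ['\n']), [])
  else
    -- row += ch twice; result += ch twice
    (st.1 ++ [ch, ch], st.2 ++ [ch, ch])

def doubleImage (img : String) : String :=
  String.mk (List.foldl pvStepA ([], []) img.toList).1

-- ===== PORT B =====
-- img.split('\n')  (hand port of Python str.split with a one-char separator, keeping empties)
def pvSplitNL : List Char → List (List Char)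
  | [] => [[]]
  | c :: cs =>
    if c = '\n' then [] :: pvSplitNL cs
    else match pvSplitNL cs with
      | [] => [[c]]          -- unreachable: pvSplitNL never returns []
      | p :: ps => (c :: p) :: ps

-- ''.join(ch * 2 for ch in line)
def pvDbl (l : List Char) : List Char := l.flatMap (fun c => [c, c])

-- the indexed loop: every piece but the last contributes d+'\n'+d+'\n', the last just d
def pvJoinB : List (List Char) → List Char
  | [] => []
  | [p] => pvDbl p
  | p :: q :: ps => pvDbl p ++ '\n' :: pvDbl p ++ '\n' :: pvJoinB (q :: ps)

def doubleImage_alt (img : String) : String :=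
  String.mk (pvJoinB (pvSplitNL img.toList))

-- ===== PRECONDITION & SPEC =====
def Spec_doubleImage (img : String) (out : String) : Prop := out = doubleImage_alt img
instance (img : String) (out : String) : Decidable (Spec_doubleImage img out) := by unfold Spec_doubleImage; infer_instance

-- ===== CLAIM (what is proved, stated in full; the proofs are below) =====
def Claim_equal_doubleImage : Prop := ∀ (img : String), Dom_doubleImage img → Spec_doubleImage img (doubleImage img)

-- ===== LEMMAS AND PROOFS =====

theorem pvSplitNL_ne_nil (cs : List Char) : pvSplitNL cs ≠ [] := by
  cases cs with
  | nil => simp [pvSplitNL]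
  | cons c cs =>
    simp only [pvSplitNL]
    split
    · simp
    · cases h : pvSplitNL cs <;> simp

theorem pvDbl_snoc (l : List Char) (c : Char) : pvDbl (l ++ [c]) = pvDbl l ++ [c, c] := by
  simp [pvDbl]

-- head-absorbing helper used only by the proof
def pvConsHead (line : List Char) : List (List Char) → List (List Char)
  | [] => [line]
  | p :: ps => (line ++ p) :: ps

theorem pvJoinB_cons_ne_nil (line : List Char) (ps : List (List Char)) (h : ps ≠ []) :
    pvJoinB (line :: ps) = pvDbl line ++ '\n' :: pvDbl line ++ '\n' :: pvJoinB ps := by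
  cases ps with
  | nil => exact absurd rfl h
  | cons q qs => rfl

-- loop invariant: A's state during a line is (committed ++ doubled line-so-far, doubled line-so-far)
theorem pvFoldA_inv (cs : List Char) : ∀ (res line : List Char),
    (List.foldl pvStepA (res ++ pvDbl line, pvDbl line) cs).1
      = res ++ pvJoinB (pvConsHead line (pvSplitNL cs)) := by
  induction cs with
  | nil =>
    intro res line
    simp [pvSplitNL, pvConsHead, pvJoinB]
  | cons c cs ih =>
    intro res line
    by_cases hc : c = '\n'
    · subst hc
      have step : List.foldl pvStepA (res ++ pvDbl line, pvDbl line) ('\n' :: cs)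
          = List.foldl pvStepA
              ((res ++ pvDbl line ++ '\n' :: pvDbl line ++ ['\n']) ++ pvDbl ([] : List Char),
               pvDbl ([] : List Char)) cs := by
        simp [pvStepA, pvDbl]
      rw [step, ih]
      have h3 : pvConsHead [] (pvSplitNL cs) = pvSplitNL cs := by
        cases h : pvSplitNL cs with
        | nil => exact absurd h (pvSplitNL_ne_nil cs)
        | cons p ps => simp [pvConsHead]
      rw [h3]
      have h4 : pvSplitNL ('\n' :: cs) = [] :: pvSplitNL cs := by simp [pvSplitNL]
      rw [h4]
      have h5 : pvConsHead line ([] :: pvSplitNL cs) = line :: pvSplitNL cs := by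
        simp [pvConsHead]
      rw [h5, pvJoinB_cons_ne_nil line _ (pvSplitNL_ne_nil cs)]
      simp
    · simp only [List.foldl_cons, pvStepA, if_neg hc]
      have h1 : res ++ pvDbl line ++ [c, c] = res ++ pvDbl (line ++ [c]) := by
        rw [pvDbl_snoc]; simp
      have h2 : pvDbl line ++ [c, c] = pvDbl (line ++ [c]) := by rw [pvDbl_snoc]
      rw [h1, h2, ih]
      have h4 : pvSplitNL (c :: cs) = pvConsHead [c] (pvSplitNL cs) := by
        simp only [pvSplitNL, if_neg hc]
        cases h : pvSplitNL cs with
        | nil => exact absurd h (pvSplitNL_ne_nil cs)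
        | cons p ps => simp [pvConsHead]
      rw [h4]
      have h5 : pvConsHead (line ++ [c]) (pvSplitNL cs)
          = pvConsHead line (pvConsHead [c] (pvSplitNL cs)) := by
        cases h : pvSplitNL cs with
        | nil => exact absurd h (pvSplitNL_ne_nil cs)
        | cons p ps => simp [pvConsHead]
      rw [h5]

-- ===== VERDICT (by name: the statement is the Claim_ definition above) =====
theorem doubleImage_spec : Claim_equal_doubleImage := by
  intro img _
  unfold Spec_doubleImage doubleImage doubleImage_alt
  have h := pvFoldA_inv img.toList [] []
  simp only [pvDbl, List.flatMap_nil, List.append_nil, List.nil_append] at h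
  rw [h]
  have h3 : pvConsHead [] (pvSplitNL img.toList) = pvSplitNL img.toList := by
    cases h : pvSplitNL img.toList with
    | nil => exact absurd h (pvSplitNL_ne_nil img.toList)
    | cons p ps => simp [pvConsHead]
  rw [h3]
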